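-- pv_equiv track=rewrite | github.com/Youssef-Mohammad/Subtitle-Detection-using-Raw-Filters | Final.py | group_lines
-- ===== SOURCE A (Python) =====
-- def group_lines(coordinates, max_vertical_gap=10):
--     """Group bounding boxes into lines based on their vertical positions."""
--     if len(coordinates) == 0:
--         return []
--
--     # Sort coordinates by their y position (top to bottom)
--     coordinates = sorted(coordinates, key=lambda x: (x[1], x[0]))
--
--     lines = []
--     current_line = [coordinates[0]]
--
--     for box in coordinates[1:]:
--         x, y, w, h = box
--         last_x, last_y, last_w, last_h = current_line[-1]
--
--         # If the y difference is within the specified gap, consider it the same line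
--         if abs(y - last_y) <= max_vertical_gap:
--             current_line.append(box)
--         else:
--             lines.append(current_line)
--             current_line = [box]
--
--     if current_line:
--         lines.append(current_line)
--
--     return lines
-- ===== SOURCE B (Python) =====
-- def group_lines(coordinates, max_vertical_gap=10):
--     """Group bounding boxes into lines: sort, then cut out one maximal chunk at a time."""
--     s = sorted(coordinates, key=lambda x: (x[1], x[0]))
--     groups = []
--     i = 0
--     n = len(s)
--     while i < n:
--         j = i + 1
--         while j < n and abs(s[j][1] - s[j - 1][1]) <= max_vertical_gap:
--             j += 1
--         groups.append(s[i:j])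
--         i = j
--     return groups
-- ===== Notes on version B (the rewrite author's own statement) =====
-- stated objective: alternative
-- what changed: Replaces A's accumulator loop (growing a current_line and flushing it into lines) by a chunk-extraction decomposition: after sorting, repeatedly take the maximal run of adjacent boxes whose consecutive y-gaps are within the threshold and emit it as one group.
import Mathlib
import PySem

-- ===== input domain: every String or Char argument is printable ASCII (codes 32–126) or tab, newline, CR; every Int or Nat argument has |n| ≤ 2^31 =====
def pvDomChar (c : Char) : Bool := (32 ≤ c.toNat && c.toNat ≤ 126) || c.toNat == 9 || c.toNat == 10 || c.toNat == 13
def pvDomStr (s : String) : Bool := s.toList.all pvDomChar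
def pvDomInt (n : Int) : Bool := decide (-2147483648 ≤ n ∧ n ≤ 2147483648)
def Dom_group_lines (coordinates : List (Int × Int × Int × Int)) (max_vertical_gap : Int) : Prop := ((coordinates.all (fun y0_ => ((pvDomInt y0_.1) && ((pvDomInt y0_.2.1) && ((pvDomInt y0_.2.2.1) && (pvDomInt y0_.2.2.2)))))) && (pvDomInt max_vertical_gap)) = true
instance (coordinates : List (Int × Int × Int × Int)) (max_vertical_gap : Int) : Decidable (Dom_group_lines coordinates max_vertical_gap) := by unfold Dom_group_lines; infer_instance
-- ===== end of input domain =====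

-- B replaces A's grow-and-flush accumulator loop by chunk extraction (take one maximal
-- adjacent run at a time) over the same sorted list; same results, no speed claim.

-- ===== PORT A =====
-- one step of A's for-loop: state = (lines, current_line); current_line[-1] read with
-- default c (the sorted head) — current_line is nonempty throughout, so never used
def glStep (gap : Int) (c : Int × Int × Int × Int)
    (st : List (List (Int × Int × Int × Int)) × List (Int × Int × Int × Int))
    (box : Int × Int × Int × Int) :
    List (List (Int × Int × Int × Int)) × List (Int × Int × Int × Int) :=
  if |box.2.1 - (st.2.getLastD c).2.1| ≤ gap then (st.1, st.2 ++ [box])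
  else (st.1 ++ [st.2], [box])

def group_lines (coordinates : List (Int × Int × Int × Int)) (max_vertical_gap : Int) : List (List (Int × Int × Int × Int)) :=
  if coordinates.length = 0 then []
  else
    match PySem.List.sorted2 coordinates (fun x => x.2.1) (fun x => x.1) with
    | [] => []  -- unreachable: sorted of a nonempty list is nonempty
    | c :: rest =>
      let st := rest.foldl (glStep max_vertical_gap c) ([], [c])
      if st.2 ≠ [] then st.1 ++ [st.2] else st.1

-- ===== PORT B =====
-- inner while loop of Source B: the maximal run adjacent to prev, and the remainder
def glSpan (gap : Int) (prev : Int × Int × Int × Int) :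
    List (Int × Int × Int × Int) → List (Int × Int × Int × Int) × List (Int × Int × Int × Int)
  | [] => ([], [])
  | x :: xs =>
    if |x.2.1 - prev.2.1| ≤ gap then
      let r := glSpan gap x xs
      (x :: r.1, r.2)
    else ([], x :: xs)

theorem glSpan_len (gap : Int) (prev : Int × Int × Int × Int) (l : List (Int × Int × Int × Int)) :
    (glSpan gap prev l).2.length ≤ l.length := by
  induction l generalizing prev with
  | nil => simp [glSpan]
  | cons x xs ih =>
    simp only [glSpan]
    split
    · exact le_trans (ih x) (Nat.le_succ _)
    · simp

-- outer while loop of Source B: emit one chunk s[i:j], continue on the rest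
def glChunks (gap : Int) : List (Int × Int × Int × Int) → List (List (Int × Int × Int × Int))
  | [] => []
  | c :: rest => (c :: (glSpan gap c rest).1) :: glChunks gap (glSpan gap c rest).2
termination_by l => l.length
decreasing_by exact Nat.lt_succ_of_le (glSpan_len _ _ _)

def group_lines_alt (coordinates : List (Int × Int × Int × Int)) (max_vertical_gap : Int) : List (List (Int × Int × Int × Int)) :=
  glChunks max_vertical_gap (PySem.List.sorted2 coordinates (fun x => x.2.1) (fun x => x.1))

-- ===== PRECONDITION & SPEC =====
def Spec_group_lines (coordinates : List (Int × Int × Int × Int)) (max_vertical_gap : Int) (out : List (List (Int × Int × Int × Int))) : Prop := out = group_lines_alt coordinates max_vertical_gap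
instance (coordinates : List (Int × Int × Int × Int)) (max_vertical_gap : Int) (out : List (List (Int × Int × Int × Int))) : Decidable (Spec_group_lines coordinates max_vertical_gap out) := by unfold Spec_group_lines; infer_instance

-- ===== CLAIM (what is proved, stated in full; the proofs are below) =====
def Claim_equal_group_lines : Prop := ∀ (coordinates : List (Int × Int × Int × Int)) (max_vertical_gap : Int), Dom_group_lines coordinates max_vertical_gap → Spec_group_lines coordinates max_vertical_gap (group_lines coordinates max_vertical_gap)

-- ===== LEMMAS AND PROOFS =====

theorem glChunks_nil (gap : Int) : glChunks gap [] = [] := by rw [glChunks]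

-- A's current_line stays nonempty through the loop
theorem glFold_snd_ne (gap : Int) (c : Int × Int × Int × Int)
    (l : List (Int × Int × Int × Int)) :
    ∀ lines cur, cur ≠ [] → (l.foldl (glStep gap c) (lines, cur)).2 ≠ [] := by
  induction l with
  | nil => intro lines cur h; simpa using h
  | cons x xs ih =>
    intro lines cur h
    simp only [List.foldl_cons, glStep]
    split
    · exact ih _ _ (by simp)
    · exact ih _ _ (by simp)

-- A's flushed lines plus the final current_line = emitted lines so far plus B's chunks
theorem glFold_eq (gap : Int) (c : Int × Int × Int × Int)
    (l : List (Int × Int × Int × Int)) :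
    ∀ lines cur, cur ≠ [] →
      (l.foldl (glStep gap c) (lines, cur)).1 ++ [(l.foldl (glStep gap c) (lines, cur)).2]
      = lines ++ (cur ++ (glSpan gap (cur.getLastD c) l).1)
          :: glChunks gap (glSpan gap (cur.getLastD c) l).2 := by
  induction l with
  | nil => intro lines cur h; simp [glSpan, glChunks_nil]
  | cons x xs ih =>
    intro lines cur h
    simp only [List.foldl_cons, glStep, glSpan]
    split
    · rw [ih lines (cur ++ [x]) (by simp)]
      simp
    · rw [ih (lines ++ [cur]) [x] (by simp)]
      have : glChunks gap (x :: xs) =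
          (x :: (glSpan gap x xs).1) :: glChunks gap (glSpan gap x xs).2 := by
        rw [glChunks]
      simp [this]

-- ===== VERDICT (by name: the statement is the Claim_ definition above) =====
theorem group_lines_spec : Claim_equal_group_lines := by
  intro coordinates max_vertical_gap _
  unfold Spec_group_lines group_lines group_lines_alt
  by_cases hnil : coordinates = []
  · subst hnil; simp [PySem.List.sorted2, glChunks_nil]
  · have hlen : ¬ coordinates.length = 0 := by simpa using hnil
    simp only [hlen, if_false]
    rcases hs : PySem.List.sorted2 coordinates (fun x => x.2.1) (fun x => x.1) with _ | ⟨c, rest⟩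
    · have hp := PySem.List.sorted2_perm coordinates (fun x => x.2.1) (fun x => x.1) false
      rw [hs] at hp
      exact absurd hp.nil_eq.symm hnil
    · have hne := glFold_snd_ne max_vertical_gap c rest [] [c] (by simp)
      simp only [hne, ne_eq, not_false_iff, if_true]
      rw [glFold_eq max_vertical_gap c rest [] [c] (by simp)]
      simp [glChunks]
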